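-- pv_equiv track=rewrite | github.com/mean71/codingtest | 프로그래머스/1/67256. ［카카오 인턴］ 키패드 누르기/［카카오 인턴］ 키패드 누르기.py | solution
-- ===== SOURCE A (Python) =====
-- def solution(num, hand):
--     res = ""
--     cur = ["*","#"]
--     for n in num:
--         if n in {1,4,7}:
--             res += "L"
--             cur[0] = n
--         elif n in {3,6,9}:
--             res += "R"
--             cur[1] = n
--         else:
--             ni = (2,5,8,0).index(n)
--
--             if cur[0] in {2,5,8,0}:
--                 l = abs(ni - (2,5,8,0).index(cur[0]))
--             else:
--                 l = abs(ni - (1,4,7,"*").index(cur[0])) + 1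
--
--             if cur[1] in {2,5,8,0}:
--                 r = abs(ni - (2,5,8,0).index(cur[1]))
--             else:
--                 r = abs(ni - (3,6,9,"#").index(cur[1])) + 1
--
--             res += ("L", "R")[l > r or l==r and hand=="right"]
--             cur[l > r or l==r and hand=="right"] = n
--
--     return res
-- ===== SOURCE B (Python) =====
-- # Precomputed transition-table automaton: a staged pass compiles the whole keypad geometry
-- # into a finite dict over (left, right, key, right-handed) states; the per-call loop is
-- # pure table lookup with no distance arithmetic.
--
-- def _dist(key, target):
--     pos = {1: (0, 0), 2: (0, 1), 3: (0, 2),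
--            4: (1, 0), 5: (1, 1), 6: (1, 2),
--            7: (2, 0), 8: (2, 1), 9: (2, 2),
--            '*': (3, 0), 0: (3, 1), '#': (3, 2)}
--     (a, b), (c, d) = pos[key], pos[target]
--     return abs(a - c) + abs(b - d)
--
-- def _entry(l, r, n, rh):
--     if n in (1, 4, 7):
--         return ('L', n, r)
--     if n in (3, 6, 9):
--         return ('R', l, n)
--     if _dist(l, n) < _dist(r, n) or (_dist(l, n) == _dist(r, n) and not rh):
--         return ('L', n, r)
--     return ('R', l, n)
--
-- def _keys():
--     return [(l, r, n, rh)
--             for l in ('*', 1, 4, 7, 2, 5, 8, 0)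
--             for r in ('#', 3, 6, 9, 2, 5, 8, 0)
--             for n in range(10)
--             for rh in (False, True)]
--
-- _TABLE = {key: _entry(*key) for key in _keys()}
--
-- def solution(num, hand):
--     rh = hand == "right"
--     l, r = '*', '#'
--     out = []
--     for n in num:
--         ch, l, r = _TABLE[(l, r, n, rh)]
--         out.append(ch)
--     return ''.join(out)
-- ===== Notes on version B (the rewrite author's own statement) =====
-- stated objective: alternative
-- what changed: B replaces A's per-element distance computation (tuple-.index arithmetic and nested column conditionals) by a staged design: a one-time pass compiles the whole keypad geometry into a finite transition table over all 1280 (left,right,key,hand) automaton states, and the per-call loop is then a pure table lookup that performs no arithmetic at all.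
-- outside the precondition, e.g. on solution([11], 'right'): A raises ValueError, B raises KeyError
import Mathlib
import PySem

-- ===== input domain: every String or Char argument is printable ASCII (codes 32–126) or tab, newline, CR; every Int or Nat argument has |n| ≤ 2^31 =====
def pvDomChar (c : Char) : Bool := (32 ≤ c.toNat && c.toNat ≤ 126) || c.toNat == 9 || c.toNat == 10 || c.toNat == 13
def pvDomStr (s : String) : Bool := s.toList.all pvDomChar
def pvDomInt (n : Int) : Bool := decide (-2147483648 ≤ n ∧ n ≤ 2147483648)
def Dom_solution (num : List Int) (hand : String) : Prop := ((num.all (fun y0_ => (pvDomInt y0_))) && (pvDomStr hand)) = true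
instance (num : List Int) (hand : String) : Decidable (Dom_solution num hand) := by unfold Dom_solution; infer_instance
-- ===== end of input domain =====

-- B compiles the keypad geometry once into a finite transition table over all (left,right,key,hand)
-- states; the per-call loop is then a pure table lookup (objective: alternative — staged
-- precomputation vs A's per-step tuple-.index distance arithmetic).


-- ===== PORT A =====
-- cur = ["*","#"] holds either a digit or the start key: modelled as Option Int, none = '*' (left) / '#' (right).
-- Python str res ported on code points as List Char (PySem convention); "L"/"R" are ['L']/['R'].
-- (2,5,8,0).index / (1,4,7,"*").index / (3,6,9,"#").index; under Pre_ the argument is always a member,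
-- the final match-arm is the last tuple element's index (Python raises only on non-members, excluded by Pre_).
def idx2580 (n : Int) : Int := if n = 2 then 0 else if n = 5 then 1 else if n = 8 then 2 else 3
def idx147 (m : Option Int) : Int :=
  match m with | some 1 => 0 | some 4 => 1 | some 7 => 2 | _ => 3   -- "*" (none) → 3
def idx369 (m : Option Int) : Int :=
  match m with | some 3 => 0 | some 6 => 1 | some 9 => 2 | _ => 3   -- "#" (none) → 3

-- one iteration of A's for-loop; hr = (hand == "right"), a pure comparison hoisted out of the loop
def stepA (hr : Bool) (st : List Char × Option Int × Option Int) (n : Int) :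
    List Char × Option Int × Option Int :=
  let res := st.1; let c0 := st.2.1; let c1 := st.2.2
  if n = 1 ∨ n = 4 ∨ n = 7 then
    (res ++ ['L'], some n, c1)
  else if n = 3 ∨ n = 6 ∨ n = 9 then
    (res ++ ['R'], c0, some n)
  else
    let ni := idx2580 n
    let l : Nat :=
      match c0 with
      | some m => if m = 2 ∨ m = 5 ∨ m = 8 ∨ m = 0 then (ni - idx2580 m).natAbs
                  else (ni - idx147 (some m)).natAbs + 1
      | none   => (ni - idx147 none).natAbs + 1
    let r : Nat :=
      match c1 with
      | some m => if m = 2 ∨ m = 5 ∨ m = 8 ∨ m = 0 then (ni - idx2580 m).natAbs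
                  else (ni - idx369 (some m)).natAbs + 1
      | none   => (ni - idx369 none).natAbs + 1
    if l > r ∨ (l = r ∧ hr) then (res ++ ['R'], c0, some n)
    else (res ++ ['L'], some n, c1)

def solution (num : List Int) (hand : String) : String :=
  String.ofList (num.foldl (stepA (hand == "right")) ([], none, none)).1

-- ===== PORT B =====
-- Python's keys mix ints with the strings '*' and '#': modelled as the sum type PadKey.
inductive PadKey
  | star
  | hash
  | num : Int → PadKey
deriving DecidableEq, Repr

-- the pos dict inside _dist
def posDict : PySem.Dict PadKey (Int × Int) :=
  PySem.Dict.ofList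
    [(.num 1, (0, 0)), (.num 2, (0, 1)), (.num 3, (0, 2)),
     (.num 4, (1, 0)), (.num 5, (1, 1)), (.num 6, (1, 2)),
     (.num 7, (2, 0)), (.num 8, (2, 1)), (.num 9, (2, 2)),
     (.star, (3, 0)), (.num 0, (3, 1)), (.hash, (3, 2))]

-- _dist(key, target); default of getD never reached for the keys _build feeds it
def distB (k t : PadKey) : Int :=
  let pa := PySem.Dict.getD posDict k (0, 0)
  let pb := PySem.Dict.getD posDict t (0, 0)
  |pa.1 - pb.1| + |pa.2 - pb.2|

-- _entry(l, r, n, rh)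
def entryB (l r : PadKey) (n : Int) (rh : Bool) : List Char × PadKey × PadKey :=
  if n = 1 ∨ n = 4 ∨ n = 7 then (['L'], .num n, r)
  else if n = 3 ∨ n = 6 ∨ n = 9 then (['R'], l, .num n)
  else if distB l (.num n) < distB r (.num n) ∨
          (distB l (.num n) = distB r (.num n) ∧ ¬ rh) then (['L'], .num n, r)
  else (['R'], l, .num n)

def leftsB : List PadKey := [.star, .num 1, .num 4, .num 7, .num 2, .num 5, .num 8, .num 0]
def rightsB : List PadKey := [.hash, .num 3, .num 6, .num 9, .num 2, .num 5, .num 8, .num 0]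

-- _keys(): the 4-level comprehension is the list product in the same order
def keysB : List (PadKey × PadKey × Int × Bool) :=
  leftsB ×ˢ rightsB ×ˢ PySem.List.pyRange 0 10 1 ×ˢ [false, true]

-- _TABLE = {key: _entry(*key) for key in _keys()}
def TABLE : PySem.Dict (PadKey × PadKey × Int × Bool) (List Char × PadKey × PadKey) :=
  keysB.foldl (fun t k => t.insert k (entryB k.1 k.2.1 k.2.2.1 k.2.2.2)) PySem.Dict.empty

-- one iteration of B's for-loop: pure table lookup; Pre_ keeps every looked-up key in the table,
-- so getD's default is never reached (missing key = Python KeyError, excluded by Pre_)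
def stepAlt (hr : Bool) (st : List (List Char) × PadKey × PadKey) (n : Int) :
    List (List Char) × PadKey × PadKey :=
  let e := PySem.Dict.getD TABLE (st.2.1, st.2.2, n, hr) ([], .star, .hash)
  (st.1 ++ [e.1], e.2.1, e.2.2)

-- ''.join(out) = PySem.Chars.join [] on the collected pieces
def solution_alt (num : List Int) (hand : String) : String :=
  String.ofList (PySem.Chars.join [] (num.foldl (stepAlt (hand == "right")) ([], .star, .hash)).1)

-- ===== PRECONDITION & SPEC =====
-- Pre_ excludes keys outside 0-9: there A raises ValueError ((2,5,8,0).index) and B raises KeyError.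
def Pre_solution (num : List Int) (hand : String) : Prop :=
  ∀ n ∈ num, n ∈ ([0, 1, 2, 3, 4, 5, 6, 7, 8, 9] : List Int)
instance (num : List Int) (hand : String) : Decidable (Pre_solution num hand) := by
  unfold Pre_solution; infer_instance
def pvWitness_solution : List Int × String := ([1, 3, 4, 5, 8, 2, 1, 4, 5, 9, 5], "right")

def Spec_solution (num : List Int) (hand : String) (out : String) : Prop := out = solution_alt num hand
instance (num : List Int) (hand : String) (out : String) : Decidable (Spec_solution num hand out) := by unfold Spec_solution; infer_instance

-- ===== CLAIM (what is proved, stated in full; the proofs are below) =====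
def Claim_equal_solution : Prop := ∀ (num : List Int) (hand : String), Dom_solution num hand → Pre_solution num hand → Spec_solution num hand (solution num hand)

-- ===== LEMMAS AND PROOFS =====
-- reachable thumb states of A: left thumb / right thumb
def L0 : List (Option Int) := [none, some 1, some 4, some 7, some 2, some 5, some 8, some 0]
def L1 : List (Option Int) := [none, some 3, some 6, some 9, some 2, some 5, some 8, some 0]
-- the PadKey B keeps for the state A keeps
def keyOfL (c : Option Int) : PadKey := match c with | none => .star | some m => .num m
def keyOfR (c : Option Int) : PadKey := match c with | none => .hash | some m => .num m
def nsList : List Int := [0, 1, 2, 3, 4, 5, 6, 7, 8, 9]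

lemma keysB_nodup : keysB.Nodup := by
  refine List.Nodup.product (by decide) (List.Nodup.product (by decide)
    (List.Nodup.product ?_ (by decide)))
  exact PySem.List.nodup_pyRange_one 0 10

lemma table_items :
    TABLE.items = keysB.map (fun k => (k, entryB k.1 k.2.1 k.2.2.1 k.2.2.2)) := by
  have h := PySem.Dict.items_foldl_insert_fresh (l := keysB) (k := fun k => k)
      (v := fun k => entryB k.1 k.2.1 k.2.2.1 k.2.2.2) (d := PySem.Dict.empty)
      (by intro a _; simp) (by simpa using keysB_nodup)
  simpa [TABLE] using h

lemma table_keys_nodup : TABLE.keys.Nodup := by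
  have : TABLE.keys = keysB := by
    simp [PySem.Dict.keys, table_items, List.map_map, Function.comp_def]
  rw [this]; exact keysB_nodup

lemma table_getD (k : PadKey × PadKey × Int × Bool) (hk : k ∈ keysB)
    (d : List Char × PadKey × PadKey) :
    PySem.Dict.getD TABLE k d = entryB k.1 k.2.1 k.2.2.1 k.2.2.2 := by
  refine PySem.Dict.getD_of_mem_items TABLE ?_ table_keys_nodup d
  rw [table_items]
  exact List.mem_map_of_mem hk

lemma memL : ∀ c0 ∈ L0, keyOfL c0 ∈ leftsB := by decide
lemma memR : ∀ c1 ∈ L1, keyOfR c1 ∈ rightsB := by decide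
lemma memN : ∀ n ∈ nsList, n ∈ PySem.List.pyRange 0 10 1 := by decide

lemma key_mem (c0 : Option Int) (c1 : Option Int) (n : Int) (hr : Bool)
    (h0 : c0 ∈ L0) (h1 : c1 ∈ L1) (hn : n ∈ nsList) :
    (keyOfL c0, keyOfR c1, n, hr) ∈ keysB := by
  refine List.pair_mem_product.mpr ⟨memL c0 h0, ?_⟩
  refine List.pair_mem_product.mpr ⟨memR c1 h1, ?_⟩
  refine List.pair_mem_product.mpr ⟨memN n hn, ?_⟩
  cases hr <;> decide

set_option maxRecDepth 8192 in
-- the per-step correspondence, checked over all reachable states, all keys 0-9 and both hands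
lemma step_key : ∀ hr ∈ [true, false], ∀ c0 ∈ L0, ∀ c1 ∈ L1, ∀ n ∈ nsList,
    [(entryB (keyOfL c0) (keyOfR c1) n hr).1]
        = ((stepA hr ([], c0, c1) n).1).map (fun c => [c])
      ∧ keyOfL (stepA hr ([], c0, c1) n).2.1 = (entryB (keyOfL c0) (keyOfR c1) n hr).2.1
      ∧ keyOfR (stepA hr ([], c0, c1) n).2.2 = (entryB (keyOfL c0) (keyOfR c1) n hr).2.2
      ∧ (stepA hr ([], c0, c1) n).2.1 ∈ L0
      ∧ (stepA hr ([], c0, c1) n).2.2 ∈ L1 := by decide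

-- stepA only appends to the accumulator; shift lemma to an empty start
lemma stepA_shift (hr : Bool) (res : List Char) (c0 c1 : Option Int) (n : Int) :
    stepA hr (res, c0, c1) n
      = (res ++ (stepA hr ([], c0, c1) n).1, (stepA hr ([], c0, c1) n).2) := by
  unfold stepA; dsimp only; split_ifs <;> rfl

-- loop invariant: B's piece list is exactly the singletons of A's result string
lemma loop_rel (hr : Bool) : ∀ (num : List Int),
    (∀ n ∈ num, n ∈ nsList) →
    ∀ (res : List Char) (out : List (List Char)) (c0 c1 : Option Int),
      c0 ∈ L0 → c1 ∈ L1 → out = res.map (fun c => [c]) →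
      (num.foldl (stepAlt hr) (out, keyOfL c0, keyOfR c1)).1
        = ((num.foldl (stepA hr) (res, c0, c1)).1).map (fun c => [c]) := by
  intro num
  induction num with
  | nil => intro _ res out c0 c1 _ _ hres; simpa using hres
  | cons n rest ih =>
    intro hpre res out c0 c1 hc0 hc1 hres
    have hn : n ∈ nsList := hpre n (List.mem_cons_self ..)
    have hrest : ∀ m ∈ rest, m ∈ nsList := fun m hm => hpre m (List.mem_cons_of_mem _ hm)
    have hhr : hr ∈ [true, false] := by cases hr <;> simp
    obtain ⟨hch, hl, hr', hm0, hm1⟩ := step_key hr hhr c0 hc0 c1 hc1 n hn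
    have hget := table_getD (keyOfL c0, keyOfR c1, n, hr) (key_mem c0 c1 n hr hc0 hc1 hn)
      ([], .star, .hash)
    have halt : stepAlt hr (out, keyOfL c0, keyOfR c1) n
        = (out ++ [(entryB (keyOfL c0) (keyOfR c1) n hr).1],
           (entryB (keyOfL c0) (keyOfR c1) n hr).2.1,
           (entryB (keyOfL c0) (keyOfR c1) n hr).2.2) := by
      unfold stepAlt; dsimp only; rw [hget]
    rw [List.foldl_cons, List.foldl_cons, stepA_shift, halt, ← hl, ← hr']
    refine ih hrest _ _ _ _ hm0 hm1 ?_
    rw [hres, hch, ← List.map_append]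

-- ===== VERDICT (by name: the statement is the Claim_ definition above) =====
theorem solution_spec : Claim_equal_solution := by
  intro num hand _ hpre
  unfold Spec_solution solution solution_alt
  have h := loop_rel (hand == "right") num hpre [] [] none none (by decide) (by decide) rfl
  have hkl : keyOfL none = .star := rfl
  have hkr : keyOfR none = .hash := rfl
  rw [hkl, hkr] at h
  rw [h, PySem.Chars.join_nil_singletons]
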